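-- pv_equiv track=rewrite | github.com/Ban-Brian/Portfolio | 01439147_204_PA3.py | clean_credits_list
-- ===== SOURCE A (Python) =====
-- def clean_credits_list(messy_list):
--     res = []   # list to store clean data
--
--     for pair in messy_list:
--         sid = pair[0]   # student ID
--         cr = pair[1]    # credits
--         idx = None      # will hold index if student exists
--         j = 0
--         # check if student ID is already in res
--         while j < len(res):
--             if res[j] == sid:
--                 idx = j   # save index of existing student
--             j += 2       # move to next student ID
--
--         if idx is not None:
--             res[idx + 1] += cr  # add credits if student already exists
--         else:
--             res.append(sid)     # add new student ID
--             res.append(cr)      # add their credits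
--
--     return res   # return the cleaned list
-- ===== SOURCE B (Python) =====
-- def clean_credits_list(messy_list):
--     # For each student ID, in order of first appearance, compute the total
--     # credits by a direct sum over the whole input; no running totals are
--     # maintained and the result list is never rescanned or mutated.
--     res = []
--     seen = set()
--     for pair in messy_list:
--         sid = pair[0]
--         if sid in seen:
--             continue
--         seen.add(sid)
--         total = 0
--         for q in messy_list:
--             if q[0] == sid:
--                 total += q[1]
--         res.append(sid)
--         res.append(total)
--     return res
-- ===== Notes on version B (the rewrite author's own statement) =====
-- stated objective: alternative
-- what changed: Instead of A's incremental accumulation that rescans and mutates the flat result list for every input pair, B enumerates student IDs in first-appearance order and computes each student's total directly as one sum over the whole input, appending each (id, total) exactly once.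
import Mathlib
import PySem

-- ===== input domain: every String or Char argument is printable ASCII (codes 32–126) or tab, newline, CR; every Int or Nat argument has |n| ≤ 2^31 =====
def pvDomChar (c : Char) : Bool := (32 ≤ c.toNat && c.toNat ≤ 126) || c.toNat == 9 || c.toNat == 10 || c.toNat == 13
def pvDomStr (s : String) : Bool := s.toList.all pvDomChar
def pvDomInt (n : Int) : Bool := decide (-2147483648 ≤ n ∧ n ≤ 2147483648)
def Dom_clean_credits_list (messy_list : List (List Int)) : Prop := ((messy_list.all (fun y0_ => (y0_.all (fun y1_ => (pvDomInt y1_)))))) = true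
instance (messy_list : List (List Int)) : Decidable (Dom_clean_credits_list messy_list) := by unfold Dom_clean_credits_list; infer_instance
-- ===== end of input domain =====

-- B enumerates student IDs in first-appearance order and computes each total by one
-- direct sum over the whole input, instead of A's rescan-and-mutate of the result list.

-- ===== PORT A =====
-- the 'while j < len(res): if res[j] == sid: idx = j; j += 2' loop
-- (res.getD j 0 is exact here: the loop only reads res[j] when j < len(res))
def pvScanA (res : List Int) (sid : Int) (j : Nat) (idx : Option Nat) : Option Nat :=
  if j < res.length then
    pvScanA res sid (j + 2) (if res.getD j 0 == sid then some j else idx)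
  else idx
termination_by res.length - j

-- the body of the for-loop after 'sid'/'cr' are read
def pvUpdateA (res : List Int) (sid cr : Int) : List Int :=
  match pvScanA res sid 0 none with
  | some idx => res.set (idx + 1) (res.getD (idx + 1) 0 + cr)
  | none => (res ++ [sid]) ++ [cr]

-- pair[0] / pair[1]: exact under Pre_ (each pair has length ≥ 2; Python raises otherwise)
def pvStepA (res : List Int) (pair : List Int) : List Int :=
  pvUpdateA res (pair.getD 0 0) (pair.getD 1 0)

def clean_credits_list (messy_list : List (List Int)) : List Int :=
  messy_list.foldl pvStepA []

-- ===== PORT B =====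
-- the inner 'total = 0; for q in messy_list: if q[0] == sid: total += q[1]' loop
def pvTotal (messy_list : List (List Int)) (sid : Int) : Int :=
  messy_list.foldl (fun t q => if q.getD 0 0 == sid then t + q.getD 1 0 else t) 0

def clean_credits_list_alt (messy_list : List (List Int)) : List Int :=
  (messy_list.foldl
    (fun (st : PySem.Set Int × List Int) pair =>
      if st.1.contains (pair.getD 0 0) then st
      else (st.1.add (pair.getD 0 0),
            st.2 ++ [pair.getD 0 0, pvTotal messy_list (pair.getD 0 0)]))
    (PySem.Set.empty, [])).2

-- ===== PRECONDITION & SPEC =====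
-- Pre_ excludes inputs containing a pair of length < 2: there both Pythons raise IndexError.
def Pre_clean_credits_list (messy_list : List (List Int)) : Prop :=
  ∀ p ∈ messy_list, 2 ≤ p.length
instance (messy_list : List (List Int)) : Decidable (Pre_clean_credits_list messy_list) := by
  unfold Pre_clean_credits_list; infer_instance

def pvWitness_clean_credits_list : List (List Int) := [[1, 3], [2, 4], [1, 5]]

def Spec_clean_credits_list (messy_list : List (List Int)) (out : List Int) : Prop :=
  out = clean_credits_list_alt messy_list
instance (messy_list : List (List Int)) (out : List Int) : Decidable (Spec_clean_credits_list messy_list out) := by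
  unfold Spec_clean_credits_list; infer_instance

-- ===== CLAIM (what is proved, stated in full; the proofs are below) =====
def Claim_equal_clean_credits_list : Prop :=
  ∀ (messy_list : List (List Int)), Dom_clean_credits_list messy_list →
    Pre_clean_credits_list messy_list →
    Spec_clean_credits_list messy_list (clean_credits_list messy_list)

-- ===== LEMMAS AND PROOFS =====

-- pair[0] as both programs read it
def pvFst (q : List Int) : Int := q.getD 0 0

-- flatten an association list into A's flat representation
def pvFlat (l : List (Int × Int)) : List Int := l.flatMap (fun p => [p.1, p.2])

-- the canonical table both programs compute: first-appearance ids with their totals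
def pvCanon (l : List (List Int)) : List (Int × Int) :=
  (PySem.List.dedup (l.map pvFst)).map (fun s => (s, pvTotal l s))

-- ---- pvTotal facts ----

lemma pvTotal_shift (l : List (List Int)) (s : Int) (t0 : Int) :
    l.foldl (fun t q => if q.getD 0 0 == s then t + q.getD 1 0 else t) t0
      = t0 + pvTotal l s := by
  induction l generalizing t0 with
  | nil => simp [pvTotal]
  | cons q t ih =>
      simp only [List.foldl_cons, pvTotal] at *
      rw [ih, ih (if (q.getD 0 0 == s) = true then 0 + q.getD 1 0 else 0)]
      split_ifs <;> ring

lemma pvTotal_cons (q : List Int) (t : List (List Int)) (s : Int) :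
    pvTotal (q :: t) s = (if pvFst q == s then q.getD 1 0 else 0) + pvTotal t s := by
  show List.foldl _ _ (q :: t) = _
  simp only [List.foldl_cons]
  rw [pvTotal_shift]
  unfold pvFst
  split_ifs <;> ring

lemma pvTotal_snoc (l : List (List Int)) (p : List Int) (s : Int) :
    pvTotal (l ++ [p]) s = pvTotal l s + (if pvFst p == s then p.getD 1 0 else 0) := by
  show List.foldl _ _ (l ++ [p]) = _
  rw [List.foldl_append]
  simp only [List.foldl_cons, List.foldl_nil]
  rw [show (List.foldl _ 0 l : Int) = pvTotal l s from rfl]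
  unfold pvFst
  split_ifs <;> ring

lemma pvTotal_zero (l : List (List Int)) (s : Int) (h : ∀ q ∈ l, pvFst q ≠ s) :
    pvTotal l s = 0 := by
  induction l with
  | nil => rfl
  | cons q t ih =>
      rw [pvTotal_cons]
      have hq : (pvFst q == s) = false := by
        simp only [beq_eq_false_iff_ne]; exact h q (by simp)
      rw [ih (fun q hq' => h q (by simp [hq']))]
      simp [hq]

-- ---- dedup snoc ----

lemma pvDedup_snoc (xs : List Int) (x : Int) :
    PySem.List.dedup (xs ++ [x]) =
      if x ∈ xs then PySem.List.dedup xs else PySem.List.dedup xs ++ [x] := by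
  rw [PySem.List.dedup_eq_ofList, PySem.List.dedup_eq_ofList]
  show (xs ++ [x]).foldl PySem.Set.add PySem.Set.empty = _
  rw [List.foldl_append]
  show PySem.Set.add (PySem.Set.ofList xs) x = _
  by_cases hm : x ∈ xs
  · have hmem : x ∈ PySem.Set.ofList xs := (PySem.Set.mem_ofList xs x).mpr hm
    simp [PySem.Set.add, hmem, hm]
  · have hmem : x ∉ PySem.Set.ofList xs := fun h => hm ((PySem.Set.mem_ofList xs x).mp h)
    simp [PySem.Set.add, hmem, hm]

-- ---- A-side: the scan loop on a flattened association list ----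

lemma pvScanA_stop (res : List Int) (sid : Int) (j : Nat) (idx : Option Nat)
    (h : ¬ j < res.length) : pvScanA res sid j idx = idx := by
  rw [pvScanA]; simp [h]

lemma pvScanA_init_aux (res : List Int) (sid : Int) :
    ∀ (n j : Nat) (idx : Option Nat), res.length ≤ j + n →
      pvScanA res sid j idx =
        match pvScanA res sid j none with
        | some m => some m
        | none => idx := by
  intro n
  induction n with
  | zero =>
      intro j idx h
      have hj : ¬ j < res.length := by omega
      rw [pvScanA_stop res sid j idx hj, pvScanA_stop res sid j none hj]
  | succ n ih =>
      intro j idx h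
      by_cases hj : j < res.length
      · conv_lhs => rw [pvScanA]
        conv_rhs => rw [pvScanA]
        simp only [hj, if_true]
        rw [ih (j + 2) (if (res.getD j 0 == sid) = true then some j else idx) (by omega),
            ih (j + 2) (if (res.getD j 0 == sid) = true then some j else none) (by omega)]
        cases pvScanA res sid (j + 2) none <;> cases hm : res.getD j 0 == sid <;>
          simp [hm]
      · rw [pvScanA_stop res sid j idx hj, pvScanA_stop res sid j none hj]

lemma pvScanA_init (res : List Int) (sid : Int) (j : Nat) (idx : Option Nat) :
    pvScanA res sid j idx =
      match pvScanA res sid j none with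
      | some m => some m
      | none => idx :=
  pvScanA_init_aux res sid res.length j idx (by omega)

lemma pvScanA_shift_aux (a b sid : Int) (res : List Int) :
    ∀ (n j : Nat), res.length ≤ j + n →
      pvScanA (a :: b :: res) sid (j + 2) none =
        (pvScanA res sid j none).map (· + 2) := by
  intro n
  induction n with
  | zero =>
      intro j h
      have h1 : ¬ j + 2 < (a :: b :: res).length := by simp; omega
      have h2 : ¬ j < res.length := by omega
      rw [pvScanA_stop _ sid _ none h1, pvScanA_stop res sid j none h2]
      rfl
  | succ n ih =>
      intro j h
      by_cases hj : j < res.length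
      · have h1 : j + 2 < (a :: b :: res).length := by simp; omega
        conv_lhs => rw [pvScanA]
        conv_rhs => rw [pvScanA]
        simp only [h1, if_true, hj, if_true]
        have hg : (a :: b :: res).getD (j + 2) 0 = res.getD j 0 := by
          simp
        rw [hg, pvScanA_init (a :: b :: res) sid (j + 2 + 2),
            pvScanA_init res sid (j + 2), ih (j + 2) (by omega)]
        cases pvScanA res sid (j + 2) none <;> cases hm : res.getD j 0 == sid <;>
          simp [hm]
      · have h1 : ¬ j + 2 < (a :: b :: res).length := by simp; omega
        rw [pvScanA_stop _ sid _ none h1, pvScanA_stop res sid j none hj]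
        rfl

lemma pvScanA_cons2 (a b sid : Int) (res : List Int) :
    pvScanA (a :: b :: res) sid 0 none =
      match pvScanA res sid 0 none with
      | some m => some (m + 2)
      | none => if a == sid then some 0 else none := by
  conv_lhs => rw [pvScanA]
  have h1 : 0 < (a :: b :: res).length := by simp
  simp only [h1, if_true]
  have hg : (a :: b :: res).getD 0 0 = a := rfl
  rw [hg, pvScanA_init (a :: b :: res) sid (0 + 2),
      pvScanA_shift_aux a b sid res res.length 0 (by omega)]
  cases pvScanA res sid 0 none <;> cases hm : a == sid <;> simp [hm]

lemma pvScanA_nil (sid : Int) : pvScanA [] sid 0 none = none :=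
  pvScanA_stop [] sid 0 none (by simp)

lemma pvScanA_flat_none (l : List (Int × Int)) (sid : Int)
    (h : sid ∉ l.map Prod.fst) : pvScanA (pvFlat l) sid 0 none = none := by
  induction l with
  | nil => simpa [pvFlat] using pvScanA_nil sid
  | cons p t ih =>
      obtain ⟨k, v⟩ := p
      rw [List.map_cons, List.mem_cons] at h
      rw [not_or] at h
      have hk : (k == sid) = false := by
        simp only [beq_eq_false_iff_ne]
        exact fun hkk => h.1 hkk.symm
      have hfl : pvFlat ((k, v) :: t) = k :: v :: pvFlat t := by simp [pvFlat]
      rw [hfl, pvScanA_cons2, ih h.2]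
      simp [hk]

-- the update step of A on the flattened table, when sid is present with value v₀
lemma pvUpdateA_flat_mem :
    ∀ (l : List (Int × Int)) (sid v₀ cr : Int),
      (l.map Prod.fst).Nodup → (sid, v₀) ∈ l →
      pvUpdateA (pvFlat l) sid cr =
        pvFlat (l.map (fun p => if p.1 == sid then (sid, v₀ + cr) else p)) := by
  intro l
  induction l with
  | nil => intro sid v₀ cr _ hm; cases hm
  | cons p t ih =>
      intro sid v₀ cr hnd hm
      obtain ⟨k, v⟩ := p
      rw [List.map_cons] at hnd
      have hknt : k ∉ t.map Prod.fst := (List.nodup_cons.mp hnd).1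
      have hndt : (t.map Prod.fst).Nodup := (List.nodup_cons.mp hnd).2
      have hfl : pvFlat ((k, v) :: t) = k :: v :: pvFlat t := by simp [pvFlat]
      rcases List.mem_cons.mp hm with heq | hmt
      · -- head entry: k = sid, v = v₀
        have hk : sid = k := congrArg Prod.fst heq
        have hv : v₀ = v := congrArg Prod.snd heq
        subst hk; subst hv
        have hsc : pvScanA (pvFlat t) sid 0 none = none := pvScanA_flat_none t sid hknt
        have htm : t.map (fun p => if (p.1 == sid) = true then (sid, v₀ + cr) else p) = t := by
          have hcg : ∀ a ∈ t, (if (a.1 == sid) = true then (sid, v₀ + cr) else a) = id a := by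
            intro a ha
            have : (a.1 == sid) = false := by
              simp only [beq_eq_false_iff_ne]
              exact fun hc => hknt (hc ▸ List.mem_map_of_mem ha)
            simp [this]
          rw [List.map_congr_left hcg, List.map_id]
        rw [pvUpdateA, hfl, pvScanA_cons2, hsc, List.map_cons]
        have hhead : (if (((sid, v₀) : Int × Int).1 == sid) = true
            then (sid, v₀ + cr) else (sid, v₀)) = (sid, v₀ + cr) := by simp
        rw [hhead, htm]
        simp [pvFlat]
      · -- sid lives in the tail; k ≠ sid
        have hsk : sid ∈ t.map Prod.fst := List.mem_map_of_mem hmt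
        have hkns : k ≠ sid := fun hkk => hknt (hkk ▸ hsk)
        have hkne : (k == sid) = false := by
          simp only [beq_eq_false_iff_ne]
          exact hkns
        have hrhs : pvFlat (((k, v) :: t).map
              (fun p => if (p.1 == sid) = true then (sid, v₀ + cr) else p))
            = k :: v :: pvFlat (t.map (fun p => if (p.1 == sid) = true then (sid, v₀ + cr) else p)) := by
          simp [pvFlat, hkns]
        rw [pvUpdateA, hfl, pvScanA_cons2, hrhs,
            ← ih sid v₀ cr hndt hmt, pvUpdateA]
        cases hS : pvScanA (pvFlat t) sid 0 none with
        | none => simp [hkne]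
        | some m =>
            have h3 : m + 2 + 1 = (m + 1) + 1 + 1 := by omega
            simp only [h3]
            simp

-- ---- A equals the canonical table (snoc induction) ----

lemma pvCanon_fst (l : List (List Int)) :
    (pvCanon l).map Prod.fst = PySem.List.dedup (l.map pvFst) := by
  simp [pvCanon, List.map_map, Function.comp_def]

lemma pvA_eq_canon (l : List (List Int)) :
    clean_credits_list l = pvFlat (pvCanon l) := by
  induction l using List.reverseRecOn with
  | nil => rfl
  | append_singleton l p ih =>
      have hA : clean_credits_list (l ++ [p]) = pvStepA (clean_credits_list l) p := by
        simp [clean_credits_list, List.foldl_append]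
      rw [hA, ih]
      set sid := p.getD 0 0 with hsid
      set cr := p.getD 1 0 with hcr
      have hfstp : pvFst p = sid := rfl
      by_cases hm : sid ∈ l.map pvFst
      · -- existing student: the scan finds it; update in place
        have hmd : sid ∈ PySem.List.dedup (l.map pvFst) :=
          (PySem.List.mem_dedup (l.map pvFst) sid).mpr hm
        have hmen : (sid, pvTotal l sid) ∈ pvCanon l :=
          List.mem_map_of_mem hmd
        have hnd : ((pvCanon l).map Prod.fst).Nodup := by
          rw [pvCanon_fst]; exact PySem.List.nodup_dedup (l.map pvFst)
        rw [pvStepA, ← hsid, ← hcr,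
            pvUpdateA_flat_mem (pvCanon l) sid (pvTotal l sid) cr hnd hmen]
        congr 1
        -- the updated table is exactly pvCanon (l ++ [p])
        unfold pvCanon
        rw [List.map_append]
        simp only [List.map_cons, List.map_nil]
        rw [pvDedup_snoc, if_pos (hfstp ▸ hm), List.map_map]
        apply List.map_congr_left
        intro s hs
        simp only [Function.comp]
        by_cases hss : s = sid
        · subst hss
          simp [pvTotal_snoc, hfstp, hcr, List.getD]
        · have h1 : (s == sid) = false := by simp [hss]
          have h2 : (pvFst p == s) = false := by
            rw [hfstp]; simp only [beq_eq_false_iff_ne]; exact fun h => hss h.symm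
          simp [h1, pvTotal_snoc, h2]
      · -- new student: the scan fails; append id and credits
        have hnm : sid ∉ (pvCanon l).map Prod.fst := by
          rw [pvCanon_fst]
          exact fun h => hm ((PySem.List.mem_dedup (l.map pvFst) sid).mp h)
        have hsc : pvScanA (pvFlat (pvCanon l)) sid 0 none = none :=
          pvScanA_flat_none (pvCanon l) sid hnm
        rw [pvStepA, ← hsid, ← hcr, pvUpdateA, hsc]
        -- RHS: pvCanon (l ++ [p]) = old entries (totals unchanged) ++ [(sid, cr)]
        unfold pvCanon
        rw [List.map_append]
        simp only [List.map_cons, List.map_nil]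
        rw [pvDedup_snoc, if_neg (hfstp ▸ hm), List.map_append]
        have hold : (PySem.List.dedup (l.map pvFst)).map (fun s => (s, pvTotal (l ++ [p]) s))
            = pvCanon l := by
          unfold pvCanon
          apply List.map_congr_left
          intro s hs
          have hsm : s ∈ l.map pvFst := (PySem.List.mem_dedup (l.map pvFst) s).mp hs
          have h2 : (pvFst p == s) = false := by
            rw [hfstp]; simp only [beq_eq_false_iff_ne]
            exact fun h => hm (h ▸ hsm)
          simp [pvTotal_snoc, h2]
        have hz : pvTotal l sid = 0 := by
          apply pvTotal_zero
          intro q hq hqs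
          exact hm (hqs ▸ List.mem_map_of_mem hq)
        have hnew : ([pvFst p].map (fun s => (s, pvTotal (l ++ [p]) s)))
            = [(sid, cr)] := by
          simp [hfstp, pvTotal_snoc, hz, hcr]
        rw [hold, hnew]
        simp [pvFlat, pvCanon, PySem.List.dedup_eq_ofList]

-- ---- B-side: the seen-set loop collects first-appearance ids ----

def pvKeys : List (List Int) → PySem.Set Int → List Int
  | [], _ => []
  | q :: t, s =>
      if s.contains (pvFst q) then pvKeys t s
      else pvFst q :: pvKeys t (s.add (pvFst q))

lemma pvB_fold (L : List (List Int)) :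
    ∀ (t : List (List Int)) (s : PySem.Set Int) (r : List Int),
      (t.foldl
        (fun (st : PySem.Set Int × List Int) pair =>
          if st.1.contains (pair.getD 0 0) then st
          else (st.1.add (pair.getD 0 0),
                st.2 ++ [pair.getD 0 0, pvTotal L (pair.getD 0 0)]))
        (s, r)).2
      = r ++ (pvKeys t s).flatMap (fun x => [x, pvTotal L x]) := by
  intro t
  induction t with
  | nil => intro s r; simp [pvKeys]
  | cons q t ih =>
      intro s r
      simp only [List.foldl_cons, pvKeys]
      by_cases hc : s.contains (pvFst q)
      · rw [show (q.getD 0 0) = pvFst q from rfl, if_pos hc, if_pos hc, ih]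
      · rw [show (q.getD 0 0) = pvFst q from rfl, if_neg hc, if_neg hc, ih]
        simp

lemma pvKeys_update : ∀ (t : List (List Int)) (s : PySem.Set Int),
    PySem.Set.update s (t.map pvFst) = s ++ pvKeys t s := by
  intro t
  induction t with
  | nil => intro s; simp [PySem.Set.update, pvKeys]
  | cons q t ih =>
      intro s
      simp only [List.map_cons, pvKeys]
      show (List.foldl PySem.Set.add (PySem.Set.add s (pvFst q)) (t.map pvFst)) = _
      by_cases hc : s.contains (pvFst q)
      · rw [if_pos hc]
        have hmem : pvFst q ∈ s := by simpa [PySem.Set.contains] using hc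
        have : PySem.Set.add s (pvFst q) = s := by simp [PySem.Set.add, hmem]
        rw [this]
        exact ih s
      · rw [if_neg hc]
        have hmem : pvFst q ∉ s := by
          intro hmm
          exact hc (by simpa [PySem.Set.contains] using hmm)
        have : PySem.Set.add s (pvFst q) = s ++ [pvFst q] := by simp [PySem.Set.add, hmem]
        rw [this]
        have := ih (s ++ [pvFst q])
        simp only [PySem.Set.update] at this
        rw [this]
        simp

lemma pvKeys_empty (l : List (List Int)) :
    pvKeys l PySem.Set.empty = PySem.List.dedup (l.map pvFst) := by
  have h := pvKeys_update l PySem.Set.empty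
  have h2 : PySem.List.dedup (l.map pvFst)
      = PySem.Set.update PySem.Set.empty (l.map pvFst) := by
    rw [PySem.List.dedup_eq_ofList]; rfl
  rw [h2, h]
  simp [PySem.Set.empty]

lemma pvB_eq_canon (l : List (List Int)) :
    clean_credits_list_alt l = pvFlat (pvCanon l) := by
  unfold clean_credits_list_alt
  rw [pvB_fold l l PySem.Set.empty [], pvKeys_empty]
  simp [pvFlat, pvCanon, List.flatMap_map]

-- ===== VERDICT (by name: the statement is the Claim_ definition above) =====
theorem clean_credits_list_spec : Claim_equal_clean_credits_list := by
  intro messy_list _ _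
  unfold Spec_clean_credits_list
  rw [pvA_eq_canon, pvB_eq_canon]
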